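-- pv_equiv track=rewrite | github.com/JSK0406/Boj_Code | 프로그래머스/lv2/87390. n＾2 배열 자르기/n＾2 배열 자르기.py | solution
-- ===== SOURCE A (Python) =====
-- def solution(n, left, right):
--     lst = []
--     answer = []
--
--     for i in range(left // n+1, (right // n) +2):
--         for _ in range(i):
--             lst.append(i)
--         for j in range(n-i):
--             lst.append(i+j+1)
--
--     answer = lst[left % n : (left % n) + (right - left + 1)]
--
--
--     return answer
-- ===== SOURCE B (Python) =====
-- def solution(n, left, right):
--     return [max(p // n, p % n) + 1 for p in range(left, right + 1)]
-- ===== Notes on version B (the rewrite author's own statement) =====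
-- stated objective: simpler
-- what changed: B replaces A's nested row-building loops plus final modular slice by a single pass that computes each output element directly from its flattened index p as max(p//n, p%n)+1.
-- outside the precondition, e.g. on solution(-2, 1, 1): A returns [], B returns [0]; on solution(2, -3, 0): A returns [1, 2, 1, 2], B returns [2, 1, 2, 1]; on solution(2, 0, 6): A returns [1, 2, 2, 2, 3, 3, 3], B returns [1, 2, 2, 2, 3, 3, 4]
import Mathlib
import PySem

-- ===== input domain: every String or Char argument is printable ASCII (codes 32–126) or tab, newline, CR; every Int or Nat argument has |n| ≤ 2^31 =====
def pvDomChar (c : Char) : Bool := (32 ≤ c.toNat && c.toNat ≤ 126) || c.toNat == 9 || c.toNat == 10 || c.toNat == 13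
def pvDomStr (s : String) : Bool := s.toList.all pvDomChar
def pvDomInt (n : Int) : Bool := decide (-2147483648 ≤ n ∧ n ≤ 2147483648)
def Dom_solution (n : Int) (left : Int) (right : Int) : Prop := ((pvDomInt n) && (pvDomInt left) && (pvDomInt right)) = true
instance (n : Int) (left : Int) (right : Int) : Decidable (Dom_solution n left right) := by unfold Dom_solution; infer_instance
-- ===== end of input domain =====

-- B computes each output element directly from its flattened index via max(p//n, p%n)+1,
-- replacing A's nested row-building loops and final modular slice (objective: simpler).


-- ===== PORT A =====
def solution (n : Int) (left : Int) (right : Int) : List Int :=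
  let lst : List Int :=
    (PySem.List.pyRange (PySem.Int.floordiv left n + 1) (PySem.Int.floordiv right n + 2) 1).foldl
      (fun lst i =>
        let lst := (PySem.List.pyRange 0 i 1).foldl (fun lst _ => lst ++ [i]) lst
        (PySem.List.pyRange 0 (n - i) 1).foldl (fun lst j => lst ++ [i + j + 1]) lst)
      []
  PySem.List.slice lst (some (PySem.Int.mod left n))
    (some (PySem.Int.mod left n + (right - left + 1)))

-- ===== PORT B =====
def solution_alt (n : Int) (left : Int) (right : Int) : List Int :=
  (PySem.List.pyRange left (right + 1) 1).map
    (fun p => max (PySem.Int.floordiv p n) (PySem.Int.mod p n) + 1)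

-- ===== PRECONDITION & SPEC =====
-- Pre_ covers the problem's stated domain (1 ≤ n, 0 ≤ left ≤ right < n²) and, beyond it, every
-- query the two programs can be seen to answer alike (left down to -n, empty queries right < left).
-- It excludes: n = 0, where A raises ZeroDivisionError; and the remaining corners where A RETURNS
-- an accidental value of its row-building and slice arithmetic — left < -n (misaligned over-long
-- rows), right ≥ n² with left ≤ right (the final slice truncates over-built rows), and, for
-- negative n, non-empty queries or empty queries whose slice start n | left and stop goes negative
-- (negative-slice-index wraparound returns a spurious prefix).
def Pre_solution (n : Int) (left : Int) (right : Int) : Prop :=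
  (1 ≤ n ∧ ((-n ≤ left ∧ right < n * n) ∨ right < left))
    ∨ (n ≤ -1 ∧ right < left ∧ (PySem.Int.mod left n < 0 ∨ right = left - 1))
instance (n : Int) (left : Int) (right : Int) : Decidable (Pre_solution n left right) := by
  unfold Pre_solution; infer_instance
def pvWitness_solution : Int × Int × Int := (3, 2, 5)
def Spec_solution (n : Int) (left : Int) (right : Int) (out : List Int) : Prop := out = solution_alt n left right
instance (n : Int) (left : Int) (right : Int) (out : List Int) : Decidable (Spec_solution n left right out) := by unfold Spec_solution; infer_instance

-- ===== CLAIM (what is proved, stated in full; the proofs are below) =====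
def Claim_equal_solution : Prop := ∀ (n : Int) (left : Int) (right : Int), Dom_solution n left right → Pre_solution n left right → Spec_solution n left right (solution n left right)

-- ===== LEMMAS AND PROOFS =====
lemma pv_fm (n r c : Int) (hn : 0 < n) (h0 : 0 ≤ c) (h1 : c < n) :
    PySem.Int.floordiv (r * n + c) n = r ∧ PySem.Int.mod (r * n + c) n = c := by
  have hd : PySem.Int.floordiv (r * n + c) n = r := by
    rw [PySem.Int.floordiv_eq_iff_of_pos hn]
    constructor
    · linarith
    · nlinarith
  refine ⟨hd, ?_⟩
  have := PySem.Int.floordiv_mul_add_mod (r * n + c) n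
  rw [hd] at this
  linarith

lemma pv_row (n i : Int) (hn : 0 < n) (h1 : 0 ≤ i) (h2 : i ≤ n) :
    (PySem.List.pyRange ((i-1)*n) (i*n) 1).map
        (fun p => max (PySem.Int.floordiv p n) (PySem.Int.mod p n) + 1)
      = (PySem.List.pyRange 0 i 1).map (fun _ => i)
        ++ (PySem.List.pyRange 0 (n - i) 1).map (fun j => i + j + 1) := by
  have hspan : i * n = (i-1) * n + n := by ring
  apply List.ext_getElem
  · simp [PySem.List.length_pyRange_one]
    omega
  intro k hk1 hk2
  simp only [List.getElem_map, PySem.List.getElem_pyRange_one, List.getElem_append,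
    List.length_map, PySem.List.length_pyRange_one] at hk1 hk2 ⊢
  have hkn : (k : Int) < n := by omega
  have hfm := pv_fm n (i-1) (k : Int) hn (by omega) hkn
  split
  · rw [hfm.1, hfm.2, max_eq_left (by omega : (k : Int) ≤ i - 1)]
    omega
  · rw [hfm.1, hfm.2, max_eq_right (by omega : i - 1 ≤ (k : Int))]
    omega

lemma pv_step (n i : Int) (hn : 0 < n) (h1 : 0 ≤ i) (h2 : i ≤ n) (acc : List Int) :
    (PySem.List.pyRange 0 (n - i) 1).foldl (fun lst j => lst ++ [i + j + 1])
        ((PySem.List.pyRange 0 i 1).foldl (fun lst _ => lst ++ [i]) acc)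
      = acc ++ (PySem.List.pyRange ((i-1)*n) (i*n) 1).map
          (fun p => max (PySem.Int.floordiv p n) (PySem.Int.mod p n) + 1) := by
  rw [PySem.List.foldl_append_singleton_eq_map, PySem.List.foldl_append_singleton_eq_map,
    List.append_assoc, pv_row n i hn h1 h2]

lemma pv_rows (n : Int) (hn : 0 < n) (m : Nat) : ∀ (a : Int) (acc : List Int), -1 ≤ a → a + m ≤ n →
    (PySem.List.pyRange (a + 1) (a + m + 1) 1).foldl
      (fun lst i =>
        (PySem.List.pyRange 0 (n - i) 1).foldl (fun lst j => lst ++ [i + j + 1])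
          ((PySem.List.pyRange 0 i 1).foldl (fun lst _ => lst ++ [i]) lst)) acc
    = acc ++ (PySem.List.pyRange (a * n) ((a + m) * n) 1).map
        (fun p => max (PySem.Int.floordiv p n) (PySem.Int.mod p n) + 1) := by
  induction m with
  | zero =>
    intro a acc h0 hle
    simp only [Nat.cast_zero, add_zero]
    rw [PySem.List.pyRange_one_eq_nil (by omega), PySem.List.pyRange_one_eq_nil (by omega)]
    simp
  | succ m ih =>
    intro a acc h0 hle
    push_cast at hle ⊢
    rw [show a + ((m:Int) + 1) + 1 = (a + 1) + (m:Int) + 1 by ring,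
        show a + ((m:Int) + 1) = (a + 1) + (m:Int) by ring]
    rw [PySem.List.pyRange_one_cons (by omega), List.foldl_cons]
    rw [pv_step n (a + 1) hn (by omega) (by omega)]
    have hih := ih (a + 1) (acc ++ (PySem.List.pyRange ((a + 1 - 1) * n) ((a + 1) * n) 1).map
          (fun p => max (PySem.Int.floordiv p n) (PySem.Int.mod p n) + 1)) (by omega) (by omega)
    rw [hih, List.append_assoc]
    congr 1
    have hm1 : (a : Int) * n ≤ (a + 1) * n :=
      mul_le_mul_of_nonneg_right (by omega) hn.le
    have hm2 : ((a : Int) + 1) * n ≤ (a + 1 + (m:Int)) * n :=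
      mul_le_mul_of_nonneg_right (by omega) hn.le
    rw [show a + 1 - 1 = a by ring, ← List.map_append,
        ← PySem.List.pyRange_one_append (a * n) ((a + 1) * n) ((a + 1 + (m:Int)) * n) hm1 hm2]

lemma pv_slice (f : Int → Int) (A B s L : Int) (hs : 0 ≤ s) (hL : 0 ≤ L)
    (hAB : A + s + L ≤ B) :
    PySem.List.slice ((PySem.List.pyRange A B 1).map f) (some s) (some (s + L))
      = (PySem.List.pyRange (A + s) (A + s + L) 1).map f := by
  rw [PySem.List.slice_toNat _ hs (by omega)]
  rw [PySem.List.pyRange_one_append A (A + s) B (by omega) (by omega), List.map_append]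
  rw [List.drop_left' (by simp [PySem.List.length_pyRange_one])]
  rw [PySem.List.pyRange_one_append (A + s) (A + s + L) B (by omega) (by omega), List.map_append]
  rw [show (s + L).toNat - s.toNat = L.toNat by omega]
  rw [List.take_left' (by simp [PySem.List.length_pyRange_one])]

lemma pv_slice_nil {α : Type} (xs : List α) (a b : Int) (hba : b ≤ a) (h : 0 ≤ b ∨ a < 0) :
    PySem.List.slice xs (some a) (some b) = [] := by
  apply List.eq_nil_of_length_eq_zero
  rw [PySem.List.length_slice]
  simp only [PySem.List.clampIdx]
  split_ifs <;> omega

lemma pv_main (n left right : Int) (hn : 1 ≤ n)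
    (hP : (-n ≤ left ∧ right < n * n) ∨ right < left) :
    solution n left right = solution_alt n left right := by
  have hn' : 0 < n := by omega
  simp only [solution, solution_alt]
  have hbl := (PySem.Int.floordiv_eq_iff_of_pos (a := left) hn').mp rfl
  have hbr := (PySem.Int.floordiv_eq_iff_of_pos (a := right) hn').mp rfl
  have hmodl : PySem.Int.mod left n = left - PySem.Int.floordiv left n * n := by
    have := PySem.Int.floordiv_mul_add_mod left n; linarith
  have hmodr : PySem.Int.mod right n = right - PySem.Int.floordiv right n * n := by
    have := PySem.Int.floordiv_mul_add_mod right n; linarith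
  set l0 := PySem.Int.floordiv left n with hl0def
  set r0 := PySem.Int.floordiv right n with hr0def
  by_cases hlr : left ≤ right
  · -- a genuine query: A's rows flatten to the formula map and the slice picks left..right
    have hl : -n ≤ left ∧ right < n * n := by
      rcases hP with h | h
      · exact h
      · omega
    have hl0 : -1 ≤ l0 := by nlinarith [hbl.2]
    have hr0 : r0 < n := by
      rw [hr0def, PySem.Int.floordiv_lt_iff_lt_mul hn']; exact hl.2
    have hll : l0 ≤ r0 := by nlinarith [hbl.1, hbl.2, hbr.1, hbr.2]
    set m := (r0 + 1 - l0).toNat with hmdef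
    have hm : (m : Int) = r0 + 1 - l0 := by omega
    rw [show r0 + 2 = l0 + (m : Int) + 1 by omega]
    rw [pv_rows n hn' m l0 [] (by omega) (by omega)]
    rw [List.nil_append, show l0 + (m : Int) = r0 + 1 by omega]
    rw [hmodl]
    rw [pv_slice _ (l0 * n) ((r0 + 1) * n) (left - l0 * n) (right - left + 1)
      (by omega) (by omega) (by nlinarith [hbr.2])]
    rw [show l0 * n + (left - l0 * n) = left by ring]
    rw [show left + (right - left + 1) = right + 1 by ring]
  · -- right < left: the slice is empty and so is B's range
    rw [not_le] at hlr
    rw [PySem.List.pyRange_one_eq_nil (a := left) (by omega)]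
    have hrl : r0 ≤ l0 := by nlinarith [hbl.1, hbl.2, hbr.1, hbr.2]
    by_cases h1 : r0 + 1 ≤ l0
    · rw [PySem.List.pyRange_one_eq_nil (a := l0 + 1) (by omega), List.foldl_nil]
      simp [PySem.List.slice]
    · have heq : r0 = l0 := by omega
      have hle2 : l0 * n ≤ right := heq ▸ hbr.1
      rw [hmodl, pv_slice_nil _ _ _ (by omega) (Or.inl (by omega))]
      simp
lemma pv_main_neg (n left right : Int) (hn : n ≤ -1) (hrl : right < left)
    (h : PySem.Int.mod left n < 0 ∨ right = left - 1) :
    solution n left right = solution_alt n left right := by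
  simp only [solution, solution_alt]
  rw [PySem.List.pyRange_one_eq_nil (a := left) (by omega)]
  have hmb := PySem.Int.mod_neg_bounds (a := left) (b := n) (by omega)
  rw [pv_slice_nil _ _ _ (by omega) ?_]
  · simp
  · by_cases hm : PySem.Int.mod left n < 0
    · exact Or.inr hm
    · rcases h with h | h
      · omega
      · exact Or.inl (by omega)

-- ===== VERDICT (by name: the statement is the Claim_ definition above) =====
theorem solution_spec : Claim_equal_solution := by
  intro n left right _ hP
  unfold Spec_solution
  rcases hP with ⟨hn, h⟩ | ⟨hn, hrl, h⟩
  · exact pv_main n left right hn h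
  · exact pv_main_neg n left right hn hrl h
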